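-- pv_equiv track=rewrite | github.com/andrewprojansky/free-fermion-lib | src/ff/ff_encodings.py | Balanced_Jordan_Wigner_encoding
-- ===== SOURCE A (Python) =====
-- def Balanced_Jordan_Wigner_encoding(num_qubits):
--     """Generate the Balanced Jordan-Wigner encoding for a given number of qubits.
--
--     Based off of CZ conjugated encoding; just listing X majoranas, no Y,
--
--     X I Z I Z I Z ...
--     Z X I Z I Z I ...
--     I Z X I Z I Z ...
--     Z I Z X I Z I """
--     ZI_string = "ZI" * (num_qubits // 2)
--     IZ_string = "IZ" * (num_qubits // 2)
--     encoding = []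
--     for i in range(num_qubits):
--         if i % 2 == 0:
--             encoding.append(IZ_string[:i] + "X" + IZ_string[:num_qubits-i-1])
--             encoding.append(IZ_string[:i] + "Y" + IZ_string[:num_qubits-i-1])
--         else:
--             encoding.append(ZI_string[:i] + "X" + IZ_string[:num_qubits-i-1])
--             encoding.append(ZI_string[:i] + "Y" + IZ_string[:num_qubits-i-1])
--     return encoding
-- ===== SOURCE B (Python) =====
-- def Balanced_Jordan_Wigner_encoding(num_qubits):
--     n = num_qubits
--     # Background buffers for the even and odd rows. Consecutive rows of the same
--     # parity differ only at two cells (columns i and i+1 move from "above the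
--     # diagonal" to "below the diagonal"), so each buffer is updated in place at
--     # just those two positions per emitted row pair -- no slicing, no per-cell work.
--     bg0 = ['Z' if j % 2 == 0 else 'I' for j in range(n)]
--     bg1 = ['Z'] + ['I' if j % 2 == 0 else 'Z' for j in range(1, n)]
--     out = []
--     for i in range(n):
--         row = bg0 if i % 2 == 0 else bg1
--         row[i] = 'X'
--         out.append(''.join(row))
--         row[i] = 'Y'
--         out.append(''.join(row))
--         row[i] = 'I'
--         if i + 1 < n:
--             row[i + 1] = 'Z'
--     return out
-- ===== Notes on version B (the rewrite author's own statement) =====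
-- stated objective: alternative
-- what changed: B drops A's precomputed pattern strings and per-row prefix/suffix slicing for an incremental algorithm: it keeps two mutable background buffers (one per row parity), writes X/Y into the diagonal cell to emit each row pair, and advances a buffer by updating only the two cells that change between consecutive same-parity rows.
import Mathlib
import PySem

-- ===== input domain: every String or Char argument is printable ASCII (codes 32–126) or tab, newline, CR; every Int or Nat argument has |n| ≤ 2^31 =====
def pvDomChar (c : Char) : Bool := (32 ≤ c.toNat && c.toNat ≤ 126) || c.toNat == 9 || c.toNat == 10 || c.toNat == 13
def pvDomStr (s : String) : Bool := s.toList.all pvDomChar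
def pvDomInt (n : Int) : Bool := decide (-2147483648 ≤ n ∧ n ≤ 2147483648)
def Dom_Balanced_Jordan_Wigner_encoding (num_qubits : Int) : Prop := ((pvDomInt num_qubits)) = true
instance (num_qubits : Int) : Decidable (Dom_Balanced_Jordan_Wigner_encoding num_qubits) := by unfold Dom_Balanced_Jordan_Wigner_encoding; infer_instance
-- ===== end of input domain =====

-- B replaces A's pattern-string slicing by an incremental algorithm: two mutable background
-- buffers (one per row parity), each updated in place at just two cells per emitted row pair
-- (objective: alternative).

-- ===== PORT A =====
def Balanced_Jordan_Wigner_encoding (num_qubits : Int) : List String :=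
  let zi : List Char := PySem.List.pyRepeat ['Z', 'I'] (PySem.Int.floordiv num_qubits 2)
  let iz : List Char := PySem.List.pyRepeat ['I', 'Z'] (PySem.Int.floordiv num_qubits 2)
  (PySem.List.pyRange 0 num_qubits 1).foldl (fun enc i =>
    if PySem.Int.mod i 2 == 0 then
      (enc ++ [String.ofList (PySem.List.slice iz none (some i) ++ ['X'] ++ PySem.List.slice iz none (some (num_qubits - i - 1)))])
        ++ [String.ofList (PySem.List.slice iz none (some i) ++ ['Y'] ++ PySem.List.slice iz none (some (num_qubits - i - 1)))]
    else
      (enc ++ [String.ofList (PySem.List.slice zi none (some i) ++ ['X'] ++ PySem.List.slice iz none (some (num_qubits - i - 1)))])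
        ++ [String.ofList (PySem.List.slice zi none (some i) ++ ['Y'] ++ PySem.List.slice iz none (some (num_qubits - i - 1)))]) []

-- ===== PORT B =====
-- every `row[k] = c` in Source B hits an index with 0 ≤ k < len(row), so the total form
-- PySem.List.pySetD is exact for it (Python would raise only out of range, never reached)
def Balanced_Jordan_Wigner_encoding_alt (num_qubits : Int) : List String :=
  let bg0 : List Char := (PySem.List.pyRange 0 num_qubits 1).map (fun j => if PySem.Int.mod j 2 == 0 then 'Z' else 'I')
  let bg1 : List Char := ['Z'] ++ (PySem.List.pyRange 1 num_qubits 1).map (fun j => if PySem.Int.mod j 2 == 0 then 'I' else 'Z')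
  let st := (PySem.List.pyRange 0 num_qubits 1).foldl
    (fun (st : List String × List Char × List Char) (i : Int) =>
      let out := st.1
      let b0 := st.2.1
      let b1 := st.2.2
      let row := if PySem.Int.mod i 2 == 0 then b0 else b1
      let row1 := PySem.List.pySetD row i 'X'
      let out1 := out ++ [String.ofList row1]
      let row2 := PySem.List.pySetD row1 i 'Y'
      let out2 := out1 ++ [String.ofList row2]
      let row3 := PySem.List.pySetD row2 i 'I'
      let row4 := if i + 1 < num_qubits then PySem.List.pySetD row3 (i + 1) 'Z' else row3
      if PySem.Int.mod i 2 == 0 then (out2, row4, b1) else (out2, b0, row4))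
    ([], bg0, bg1)
  st.1

-- ===== PRECONDITION & SPEC =====
def Spec_Balanced_Jordan_Wigner_encoding (num_qubits : Int) (out : List String) : Prop := out = Balanced_Jordan_Wigner_encoding_alt num_qubits
instance (num_qubits : Int) (out : List String) : Decidable (Spec_Balanced_Jordan_Wigner_encoding num_qubits out) := by unfold Spec_Balanced_Jordan_Wigner_encoding; infer_instance

-- ===== CLAIM (what is proved, stated in full; the proofs are below) =====
def Claim_equal_Balanced_Jordan_Wigner_encoding : Prop := ∀ (num_qubits : Int), Dom_Balanced_Jordan_Wigner_encoding num_qubits → Spec_Balanced_Jordan_Wigner_encoding num_qubits (Balanced_Jordan_Wigner_encoding num_qubits)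

-- ===== LEMMAS AND PROOFS =====

-- background character of row i at column j (away from the diagonal)
def bgN (i j : Nat) : Char :=
  if j < i then (if (i + j) % 2 = 0 then 'I' else 'Z')
  else (if (i + j) % 2 = 0 then 'Z' else 'I')

-- full character of row i with center c
def bjwF (it : Nat) (c : Char) (k : Nat) : Char := if k = it then c else bgN it k

-- background buffer of row i (note bgN i i = 'Z', the resting value both ports leave there)
def bjwBuf (i n : Nat) : List Char := (List.range n).map (bgN i)

-- the X- and Y-row of block i, in canonical form
def bjwPair (n i : Int) : List String :=
  [String.ofList ((List.range n.toNat).map (bjwF i.toNat 'X')),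
   String.ofList ((List.range n.toNat).map (bjwF i.toNat 'Y'))]

-- the canonical output, rows i = a, a+1, …, n-1
def bjwRowsFrom (a n : Int) : List String :=
  (PySem.List.pyRange a n 1).flatMap (bjwPair n)

-- flattened replicate of a two-char unit is the alternating pattern, indexed by parity
theorem bjw_rep2 (a b : Char) (K : Nat) :
    (List.replicate K [a, b]).flatten
      = (List.range (2 * K)).map (fun j => if j % 2 = 0 then a else b) := by
  induction K with
  | zero => simp
  | succ k ih =>
    rw [List.replicate_succ', List.flatten_append, ih]
    have h2 : 2 * (k + 1) = (2 * k + 1) + 1 := by ring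
    have e0 : (2 * k) % 2 = 0 := by omega
    have e1 : (2 * k + 1) % 2 = 1 := by omega
    rw [h2, List.range_succ, List.range_succ]
    simp [e0, e1]

-- A's slice of the precomputed pattern, in canonical form
theorem bjw_take_pat (a b : Char) (n m : Int) (h0 : 0 ≤ m) (h1 : m < n) :
    PySem.List.slice (PySem.List.pyRepeat [a, b] (PySem.Int.floordiv n 2)) none (some m)
      = (List.range m.toNat).map (fun j => if j % 2 = 0 then a else b) := by
  have hK : m.toNat ≤ 2 * (PySem.Int.floordiv n 2).toNat := by
    simp only [PySem.Int.floordiv, Int.fdiv_eq_ediv]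
    omega
  rw [PySem.List.slice_to _ h0]
  show (PySem.List.pyRepeat [a, b] (PySem.Int.floordiv n 2)).take m.toNat = _
  rw [show PySem.List.pyRepeat [a, b] (PySem.Int.floordiv n 2)
        = (List.replicate (PySem.Int.floordiv n 2).toNat [a, b]).flatten from rfl]
  rw [bjw_rep2, ← List.map_take, List.take_range, Nat.min_eq_left hK]

-- splitting the canonical row at the diagonal
theorem bjw_split (F : Nat → Char) (it m : Nat) :
    (List.range (it + 1 + m)).map F
      = (List.range it).map F ++ [F it] ++ (List.range m).map (fun k => F (it + 1 + k)) := by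
  rw [show it + 1 + m = it + (1 + m) from by ring, List.range_add, List.map_append,
      show 1 + m = 1 + m from rfl, List.range_add, List.map_append]
  simp [List.range_succ, Function.comp, Nat.add_assoc]

-- A's row (prefix slice ++ center ++ suffix slice) equals the canonical row
theorem bjw_rowA (n i : Int) (h0 : 0 ≤ i) (h1 : i < n) :
    ∀ c : Char,
      (if PySem.Int.mod i 2 == 0
         then PySem.List.slice (PySem.List.pyRepeat ['I','Z'] (PySem.Int.floordiv n 2)) none (some i)
         else PySem.List.slice (PySem.List.pyRepeat ['Z','I'] (PySem.Int.floordiv n 2)) none (some i))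
        ++ [c] ++ PySem.List.slice (PySem.List.pyRepeat ['I','Z'] (PySem.Int.floordiv n 2)) none (some (n - i - 1))
      = (List.range n.toNat).map (bjwF i.toNat c) := by
  have hs0 : (0 : Int) ≤ n - i - 1 := by omega
  have hs1 : n - i - 1 < n := by omega
  intro c
  have hnt : n.toNat = i.toNat + 1 + (n - i - 1).toNat := by omega
  rw [hnt, bjw_split]
  have hc : bjwF i.toNat c i.toNat = c := by simp [bjwF]
  rw [hc]
  have hparity : PySem.Int.mod i 2 == 0 ↔ i.toNat % 2 = 0 := by
    simp only [PySem.Int.mod, Int.fmod_eq_emod, beq_iff_eq]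
    omega
  have hsuf : PySem.List.slice (PySem.List.pyRepeat ['I','Z'] (PySem.Int.floordiv n 2)) none (some (n - i - 1))
      = (List.range (n - i - 1).toNat).map (fun k => bjwF i.toNat c (i.toNat + 1 + k)) := by
    rw [bjw_take_pat 'I' 'Z' n (n - i - 1) hs0 hs1]
    apply List.map_congr_left
    intro k _
    have h1' : ¬ (i.toNat + 1 + k = i.toNat) := by omega
    have h2' : ¬ (i.toNat + 1 + k < i.toNat) := by omega
    simp only [bjwF, bgN, if_neg h1', if_neg h2']
    have : (i.toNat + (i.toNat + 1 + k)) % 2 = (k + 1) % 2 := by omega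
    rw [this]
    by_cases e1 : k % 2 = 0
    · have e2 : ¬ ((k + 1) % 2 = 0) := by omega
      rw [if_pos e1, if_neg e2]
    · have e2 : (k + 1) % 2 = 0 := by omega
      rw [if_neg e1, if_pos e2]
  rw [hsuf]
  by_cases hi : PySem.Int.mod i 2 == 0
  · have hie : i.toNat % 2 = 0 := hparity.mp hi
    rw [if_pos hi, bjw_take_pat 'I' 'Z' n i h0 h1]
    congr 2
    apply List.map_congr_left
    intro j hj
    rw [List.mem_range] at hj
    have h1' : ¬ (j = i.toNat) := by omega
    simp only [bjwF, bgN, if_neg h1', if_pos hj]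
    have : (i.toNat + j) % 2 = j % 2 := by omega
    rw [this]
  · have hio : i.toNat % 2 = 1 := by
      have := (not_iff_not.mpr hparity).mp hi; omega
    rw [if_neg hi, bjw_take_pat 'Z' 'I' n i h0 h1]
    congr 2
    apply List.map_congr_left
    intro j hj
    rw [List.mem_range] at hj
    have h1' : ¬ (j = i.toNat) := by omega
    simp only [bjwF, bgN, if_neg h1', if_pos hj]
    by_cases e1 : j % 2 = 0
    · have e2 : ¬ ((i.toNat + j) % 2 = 0) := by omega
      rw [if_pos e1, if_neg e2]
    · have e2 : (i.toNat + j) % 2 = 0 := by omega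
      rw [if_neg e1, if_pos e2]

-- A equals the canonical output
theorem bjw_A (n : Int) : Balanced_Jordan_Wigner_encoding n = bjwRowsFrom 0 n := by
  unfold Balanced_Jordan_Wigner_encoding
  have h2 : (PySem.List.pyRange 0 n 1).foldl (fun enc i => enc ++ bjwPair n i) ([] : List String)
      = bjwRowsFrom 0 n := by
    rw [PySem.List.foldl_append_eq_flatMap]
    simp [bjwRowsFrom]
  rw [← h2]
  apply PySem.List.foldl_congr_mem
  intro acc i hi
  obtain ⟨h0, h1⟩ := PySem.List.mem_pyRange_one.mp hi
  have hX := bjw_rowA n i h0 h1 'X'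
  have hY := bjw_rowA n i h0 h1 'Y'
  unfold bjwPair
  by_cases hm : PySem.Int.mod i 2 == 0
  · rw [if_pos hm]
    rw [if_pos hm] at hX hY
    rw [hX, hY]
    simp
  · rw [if_neg hm]
    rw [if_neg hm] at hX hY
    rw [hX, hY]
    simp

-- setting one cell of a tabulated list re-tabulates with the pointwise update
theorem set_map_range (g : Nat → Char) (n i : Nat) (_h : i < n) (c : Char) :
    ((List.range n).map g).set i c = (List.range n).map (fun k => if k = i then c else g k) := by
  apply List.ext_getElem (by simp)
  intro k h1 h2
  simp only [List.getElem_set, List.getElem_map, List.getElem_range]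
  by_cases hk : k = i
  · rw [if_pos hk.symm, if_pos hk]
  · rw [if_neg (fun h' => hk h'.symm), if_neg hk]

-- overwriting the center again just swaps the center character
theorem bjw_set_center (n i : Nat) (h : i < n) (c c' : Char) :
    ((List.range n).map (bjwF i c)).set i c' = (List.range n).map (bjwF i c') := by
  rw [set_map_range _ _ _ h]
  apply List.map_congr_left
  intro k _
  by_cases hk : k = i
  · simp [bjwF, hk]
  · simp [bjwF, hk]

-- restoring cell i to 'I' and (when present) cell i+1 to 'Z' advances the buffer two rows
theorem bjw_advance_lt (n i : Nat) (h2 : i + 1 < n) :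
    ((List.range n).map (fun k => if k = i then 'I' else bjwF i 'Y' k)).set (i + 1) 'Z'
      = bjwBuf (i + 2) n := by
  unfold bjwBuf
  rw [set_map_range _ _ _ h2]
  apply List.map_congr_left
  intro k hk
  rw [List.mem_range] at hk
  by_cases e1 : k = i + 1
  · rw [if_pos e1, e1]
    simp only [bgN]
    rw [if_pos (show i + 1 < i + 2 by omega),
        if_neg (show ¬ (i + 2 + (i + 1)) % 2 = 0 by omega)]
  · rw [if_neg e1]
    by_cases e2 : k = i
    · rw [if_pos e2, e2]
      simp only [bgN]
      rw [if_pos (show i < i + 2 by omega), if_pos (show (i + 2 + i) % 2 = 0 by omega)]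
    · rw [if_neg e2]
      simp only [bjwF, if_neg e2, bgN]
      have hpar : (i + 2 + k) % 2 = (i + k) % 2 := by omega
      by_cases e3 : k < i
      · rw [if_pos e3, if_pos (show k < i + 2 by omega), hpar]
      · rw [if_neg e3, if_neg (show ¬ k < i + 2 by omega), hpar]

theorem bjw_advance_last (n i : Nat) (h : i < n) (h2 : ¬ i + 1 < n) :
    (List.range n).map (fun k => if k = i then 'I' else bjwF i 'Y' k) = bjwBuf (i + 2) n := by
  unfold bjwBuf
  apply List.map_congr_left
  intro k hk
  rw [List.mem_range] at hk
  by_cases e2 : k = i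
  · rw [if_pos e2, e2]
    simp only [bgN]
    rw [if_pos (show i < i + 2 by omega), if_pos (show (i + 2 + i) % 2 = 0 by omega)]
  · rw [if_neg e2]
    simp only [bjwF, if_neg e2, bgN]
    have e3 : k < i := by omega
    have hpar : (i + 2 + k) % 2 = (i + k) % 2 := by omega
    rw [if_pos e3, if_pos (show k < i + 2 by omega), hpar]

-- the loop invariant: the buffer of the current parity is row i's background, the other row (i+1)'s
-- the loop invariant: the buffer of the current parity is row i's background, the other row (i+1)'s
-- (the foldl body below is the zeta-reduced form of the loop body of the port of B)
theorem bjw_invB (n : Int) (d : Nat) :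
    ∀ (a : Int), 0 ≤ a → a ≤ n → d = (n - a).toNat →
    ∀ (out : List String) (b0 b1 : List Char),
    (if PySem.Int.mod a 2 == 0 then b0 else b1) = bjwBuf a.toNat n.toNat →
    (if PySem.Int.mod a 2 == 0 then b1 else b0) = bjwBuf (a.toNat + 1) n.toNat →
    ((PySem.List.pyRange a n 1).foldl
      (fun (st : List String × List Char × List Char) (i : Int) =>
        if PySem.Int.mod i 2 == 0 then
          (st.1 ++ [String.ofList (PySem.List.pySetD (if PySem.Int.mod i 2 == 0 then st.2.1 else st.2.2) i 'X')] ++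
             [String.ofList (PySem.List.pySetD (PySem.List.pySetD (if PySem.Int.mod i 2 == 0 then st.2.1 else st.2.2) i 'X') i 'Y')],
           if i + 1 < n then
             PySem.List.pySetD (PySem.List.pySetD (PySem.List.pySetD (PySem.List.pySetD (if PySem.Int.mod i 2 == 0 then st.2.1 else st.2.2) i 'X') i 'Y') i 'I') (i + 1) 'Z'
           else
             PySem.List.pySetD (PySem.List.pySetD (PySem.List.pySetD (if PySem.Int.mod i 2 == 0 then st.2.1 else st.2.2) i 'X') i 'Y') i 'I',
           st.2.2)
        else
          (st.1 ++ [String.ofList (PySem.List.pySetD (if PySem.Int.mod i 2 == 0 then st.2.1 else st.2.2) i 'X')] ++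
             [String.ofList (PySem.List.pySetD (PySem.List.pySetD (if PySem.Int.mod i 2 == 0 then st.2.1 else st.2.2) i 'X') i 'Y')],
           st.2.1,
           if i + 1 < n then
             PySem.List.pySetD (PySem.List.pySetD (PySem.List.pySetD (PySem.List.pySetD (if PySem.Int.mod i 2 == 0 then st.2.1 else st.2.2) i 'X') i 'Y') i 'I') (i + 1) 'Z'
           else
             PySem.List.pySetD (PySem.List.pySetD (PySem.List.pySetD (if PySem.Int.mod i 2 == 0 then st.2.1 else st.2.2) i 'X') i 'Y') i 'I'))
      (out, b0, b1)).1 = out ++ bjwRowsFrom a n := by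
  induction d with
  | zero =>
    intro a h0 ha hd out b0 b1 hb0 hb1
    have hna : n ≤ a := by omega
    rw [PySem.List.pyRange_one_eq_nil hna]
    unfold bjwRowsFrom
    rw [PySem.List.pyRange_one_eq_nil hna]
    simp
  | succ d ih =>
    intro a h0 ha hd out b0 b1 hb0 hb1
    have hlt : a < n := by omega
    rw [PySem.List.pyRange_one_cons hlt, List.foldl_cons]
    dsimp only
    have hat : a.toNat < n.toNat := by omega
    have hx : PySem.List.pySetD (bjwBuf a.toNat n.toNat) a 'X'
        = (List.range n.toNat).map (bjwF a.toNat 'X') := by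
      unfold bjwBuf
      rw [PySem.List.pySetD_of_nonneg _ _ h0, set_map_range _ _ _ hat]
      apply List.map_congr_left
      intro k _
      by_cases hk : k = a.toNat
      · simp [bjwF, hk]
      · simp [bjwF, hk]
    have hy : PySem.List.pySetD ((List.range n.toNat).map (bjwF a.toNat 'X')) a 'Y'
        = (List.range n.toNat).map (bjwF a.toNat 'Y') := by
      rw [PySem.List.pySetD_of_nonneg _ _ h0, bjw_set_center _ _ hat]
    have hi' : PySem.List.pySetD ((List.range n.toNat).map (bjwF a.toNat 'Y')) a 'I'
        = (List.range n.toNat).map (fun k => if k = a.toNat then 'I' else bjwF a.toNat 'Y' k) := by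
      rw [PySem.List.pySetD_of_nonneg _ _ h0, set_map_range _ _ _ hat]
    have hadv : (if a + 1 < n
          then PySem.List.pySetD ((List.range n.toNat).map (fun k => if k = a.toNat then 'I' else bjwF a.toNat 'Y' k)) (a + 1) 'Z'
          else (List.range n.toNat).map (fun k => if k = a.toNat then 'I' else bjwF a.toNat 'Y' k))
        = bjwBuf (a.toNat + 2) n.toNat := by
      by_cases hg : a + 1 < n
      · rw [if_pos hg, PySem.List.pySetD_of_nonneg _ _ (by omega : (0:Int) ≤ a + 1),
            show (a + 1).toNat = a.toNat + 1 from by omega, bjw_advance_lt _ _ (by omega)]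
      · rw [if_neg hg, bjw_advance_last _ _ hat (by omega)]
    have hrows : bjwRowsFrom a n
        = [String.ofList ((List.range n.toNat).map (bjwF a.toNat 'X')),
           String.ofList ((List.range n.toNat).map (bjwF a.toNat 'Y'))] ++ bjwRowsFrom (a + 1) n := by
      unfold bjwRowsFrom
      rw [PySem.List.pyRange_one_cons hlt, List.flatMap_cons]
      rfl
    have hpflip : (PySem.Int.mod (a + 1) 2 == 0) = !(PySem.Int.mod a 2 == 0) := by
      simp only [PySem.Int.mod, Int.fmod_eq_emod]
      by_cases hp : a % 2 = 0
      · have : (a + 1) % 2 = 1 := by omega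
        simp [hp, this]
      · have h1 : a % 2 = 1 := by omega
        have : (a + 1) % 2 = 0 := by omega
        simp [h1, this]
    have ht1 : (a + 1).toNat = a.toNat + 1 := by omega
    have ht2 : (a + 1).toNat + 1 = a.toNat + 2 := by omega
    by_cases hm : PySem.Int.mod a 2 == 0
    · rw [if_pos hm] at hb0 hb1
      rw [if_pos hm, if_pos hm, hb0, hx, hy, hi', hadv]
      rw [ih (a + 1) (by omega) (by omega) (by omega)
            (out ++ [String.ofList ((List.range n.toNat).map (bjwF a.toNat 'X'))]
                 ++ [String.ofList ((List.range n.toNat).map (bjwF a.toNat 'Y'))])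
            (bjwBuf (a.toNat + 2) n.toNat) b1
            (by rw [hpflip, hm]; simpa [ht1] using hb1)
            (by rw [hpflip, hm]; simp [ht2])]
      rw [hrows]
      simp
    · rw [if_neg hm] at hb0 hb1
      rw [if_neg hm, if_neg hm, hb0, hx, hy, hi', hadv]
      rw [ih (a + 1) (by omega) (by omega) (by omega)
            (out ++ [String.ofList ((List.range n.toNat).map (bjwF a.toNat 'X'))]
                 ++ [String.ofList ((List.range n.toNat).map (bjwF a.toNat 'Y'))])
            b0 (bjwBuf (a.toNat + 2) n.toNat)
            (by have hm' : (PySem.Int.mod a 2 == 0) = false := by simpa using hm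
                rw [hpflip, hm']; simpa [ht1] using hb1)
            (by have hm' : (PySem.Int.mod a 2 == 0) = false := by simpa using hm
                rw [hpflip, hm']; simp [ht2])]
      rw [hrows]
      simp

-- the initial buffers are the backgrounds of rows 0 and 1
theorem bjw_init0 (n : Int) :
    (PySem.List.pyRange 0 n 1).map (fun j => if PySem.Int.mod j 2 == 0 then 'Z' else 'I')
      = bjwBuf 0 n.toNat := by
  unfold bjwBuf
  rw [PySem.List.pyRange_one, List.map_map, show (n - 0).toNat = n.toNat from by omega]
  apply List.map_congr_left
  intro k _
  simp only [Function.comp, zero_add, bgN, Nat.not_lt_zero]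
  have hmod : (PySem.Int.mod (k : Int) 2 == 0) = decide ((0 + k) % 2 = 0) := by
    simp only [PySem.Int.mod, Int.fmod_eq_emod]
    by_cases hp : k % 2 = 0
    · simp [hp]; omega
    · have : ¬ ((k : Int) % 2 = 0) := by omega
      simp [hp, this]
  rw [hmod]
  simp

theorem bjw_init1 (n : Int) (hn : 1 ≤ n) :
    ['Z'] ++ (PySem.List.pyRange 1 n 1).map (fun j => if PySem.Int.mod j 2 == 0 then 'I' else 'Z')
      = bjwBuf 1 n.toNat := by
  unfold bjwBuf
  have hsp : n.toNat = 1 + (n - 1).toNat := by omega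
  rw [hsp, List.range_add, List.map_append]
  have h1 : (List.range 1).map (bgN 1) = ['Z'] := by
    simp [List.range_succ, bgN]
  rw [h1, PySem.List.pyRange_one, List.map_map]
  congr 1
  rw [List.map_map]
  apply List.map_congr_left
  intro k _
  simp only [Function.comp, bgN, if_neg (by omega : ¬ 1 + k < 1)]
  have hmod : (PySem.Int.mod (1 + (k : Int)) 2 == 0) = decide ((1 + (1 + k)) % 2 ≠ 0) := by
    simp only [PySem.Int.mod, Int.fmod_eq_emod]
    by_cases hp : k % 2 = 0
    · have : (1 + (k : Int)) % 2 = 1 := by omega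
      simp [this]; omega
    · have : (1 + (k : Int)) % 2 = 0 := by omega
      simp [this]; omega
  rw [hmod]
  by_cases hp : (1 + (1 + k)) % 2 = 0
  · simp [hp]
  · simp [hp]

-- B equals the canonical output
theorem bjw_B (n : Int) : Balanced_Jordan_Wigner_encoding_alt n = bjwRowsFrom 0 n := by
  unfold Balanced_Jordan_Wigner_encoding_alt
  by_cases hn : 1 ≤ n
  · dsimp only
    rw [bjw_invB n (n - 0).toNat 0 (by omega) (by omega) rfl []
          _ _ (by rw [if_pos (by decide)]; exact bjw_init0 n)
          (by rw [if_pos (by decide)]; exact bjw_init1 n hn)]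
    simp
  · have hnil : PySem.List.pyRange 0 n 1 = [] := PySem.List.pyRange_one_eq_nil (by omega)
    dsimp only
    rw [hnil]
    unfold bjwRowsFrom
    rw [hnil]
    simp

theorem Balanced_Jordan_Wigner_encoding_eq (n : Int) :
    Balanced_Jordan_Wigner_encoding n = Balanced_Jordan_Wigner_encoding_alt n := by
  rw [bjw_A, bjw_B]

-- ===== VERDICT (by name: the statement is the Claim_ definition above) =====
theorem Balanced_Jordan_Wigner_encoding_spec : Claim_equal_Balanced_Jordan_Wigner_encoding := by
  intro n _
  unfold Spec_Balanced_Jordan_Wigner_encoding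
  exact Balanced_Jordan_Wigner_encoding_eq n
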